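-- pv_equiv track=rewrite | github.com/alexandraback/datacollection | solutions_2463486_1/Python/MatMatMat/problem3.py | incPalin
-- ===== SOURCE A (Python) =====
-- def incPalin(palint):
-- 	mid = palint[0]
-- 	palin = palint[1]
-- 	palin[len(palin)-1] += 1
-- 	i=len(palin)-1
-- 	while (palin[i] == 10):
-- 		palin[i] = 0
-- 		if i > 0:
-- 			palin[i-1] += 1
-- 			i -= 1
-- 		elif mid:
-- 			mid = False
-- 			palin.insert(0,1)
-- 		else:
-- 			mid = True
-- 			palin[i]=1
-- 	return (mid,palin)
-- ===== SOURCE B (Python) =====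
-- def incPalin(palint):
--     mid, palin = palint[0], palint[1]
--     # single LEFT-TO-RIGHT pass: remember the last position whose digit is not 9;
--     # everything to its right is a trailing run of 9s that the increment turns into 0s.
--     p = -1
--     for j, d in enumerate(palin):
--         if d != 9:
--             p = j
--     if p >= 0:
--         palin[p] += 1
--         palin[p + 1:] = [0] * (len(palin) - p - 1)
--     elif mid:
--         palin[:] = [1] + [0] * len(palin)
--         mid = False
--     else:
--         palin[:] = [1] + [0] * (len(palin) - 1)
--         mid = True
--     return (mid, palin)
-- ===== Notes on version B (the rewrite author's own statement) =====
-- stated objective: alternative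
-- what changed: B replaces A's right-to-left increment-and-carry while loop by a single left-to-right scan that records the last non-9 position, then rewrites the answer in one shot (bump that digit and zero the suffix, or rebuild the list as 1 followed by zeros on full overflow).
import Mathlib
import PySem

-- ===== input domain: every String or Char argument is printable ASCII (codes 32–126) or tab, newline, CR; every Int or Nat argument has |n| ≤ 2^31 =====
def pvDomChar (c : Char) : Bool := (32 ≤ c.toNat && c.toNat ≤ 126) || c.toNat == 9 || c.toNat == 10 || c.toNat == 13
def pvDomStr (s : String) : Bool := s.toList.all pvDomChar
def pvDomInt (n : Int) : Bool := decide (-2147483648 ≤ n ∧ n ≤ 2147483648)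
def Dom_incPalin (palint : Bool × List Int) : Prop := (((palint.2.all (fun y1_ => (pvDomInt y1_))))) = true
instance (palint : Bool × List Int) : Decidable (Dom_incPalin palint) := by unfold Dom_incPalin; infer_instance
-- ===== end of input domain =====

-- B replaces A's right-to-left carry loop by one left-to-right scan for the last non-9 digit
-- plus a single rewrite (alternative decomposition); both Pythons mutate the list argument in
-- place, the equivalence proved here is about the return value.

-- ===== PORT A =====
-- A's carry-propagation while loop: state (mid, palin, i); condition palin[i] == 10.
-- The elif/else branches set palin[0] = 1 (or prepend 1), after which Python's re-check of the
-- condition is trivially false, so the port returns directly there.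
def incPalinLoopA (mid : Bool) (palin : List Int) (i : Nat) : Bool × List Int :=
  if palin.getD i 0 == 10 then
    let palin := palin.set i 0
    if i > 0 then
      incPalinLoopA mid (palin.modify (i-1) (· + 1)) (i-1)
    else if mid then
      (false, 1 :: palin)
    else
      (true, palin.set 0 1)
  else
    (mid, palin)
  termination_by i
  decreasing_by omega

def incPalin (palint : Bool × List Int) : Bool × List Int :=
  let mid := palint.1
  let palin := palint.2.modify (palint.2.length - 1) (· + 1)
  incPalinLoopA mid palin (palint.2.length - 1)

-- ===== PORT B =====
-- B's left-to-right scan: p = index of the last digit ≠ 9, or -1 if all digits are 9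
-- (the 'for j, d in enumerate(palin)' loop of Source B as a fold over the enumerated list).
def incPalinLastNon9 (palin : List Int) : Int :=
  (PySem.List.enumerate palin 0).foldl (fun p jd => if jd.2 ≠ 9 then jd.1 else p) (-1)

def incPalin_alt (palint : Bool × List Int) : Bool × List Int :=
  let mid := palint.1
  let palin := palint.2
  let p := incPalinLastNon9 palin
  if p ≥ 0 then
    -- palin[p] += 1; palin[p+1:] = [0] * (len(palin) - p - 1)
    let q := p.toNat
    (mid, (palin.modify q (· + 1)).take (q + 1) ++ List.replicate (palin.length - q - 1) 0)
  else if mid then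
    (false, 1 :: List.replicate palin.length 0)
  else
    (true, 1 :: List.replicate (palin.length - 1) 0)

-- ===== PRECONDITION & SPEC =====
-- Pre_ excludes the empty digit list, on which Python A raises IndexError (palin[-1] on []).
def Pre_incPalin (palint : Bool × List Int) : Prop := palint.2 ≠ []
instance (palint : Bool × List Int) : Decidable (Pre_incPalin palint) := by unfold Pre_incPalin; infer_instance
def pvWitness_incPalin : (Bool × List Int) := (true, [9])

def Spec_incPalin (palint : Bool × List Int) (out : Bool × List Int) : Prop := out = incPalin_alt palint
instance (palint : Bool × List Int) (out : Bool × List Int) : Decidable (Spec_incPalin palint out) := by unfold Spec_incPalin; infer_instance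

-- ===== CLAIM (what is proved, stated in full; the proofs are below) =====
def Claim_equal_incPalin : Prop := ∀ (palint : Bool × List Int), Dom_incPalin palint → Pre_incPalin palint → Spec_incPalin palint (incPalin palint)

-- ===== LEMMAS AND PROOFS =====

-- proof-only helper: the trailing scan A's carry loop amounts to; m+1 encodes the current
-- index (0 = ran off the front); returns the list with the trailing 9s zeroed and the final
-- index (none = full overflow).
def incPalinTrail (palin : List Int) : Nat → List Int × Option Nat
  | 0 => (palin, none)
  | m+1 => if palin.getD m 0 == 9 then incPalinTrail (palin.set m 0) m else (palin, some m)

theorem incPalin_getD_modify_self (l : List Int) (i : Nat) (f : Int → Int) (h : i < l.length) :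
    (l.modify i f)[i]?.getD 0 = f (l[i]?.getD 0) := by
  simp [List.getElem?_eq_getElem h]

theorem incPalin_set_modify_self (l : List Int) (i : Nat) (f : Int → Int) (v : Int) :
    (l.modify i f).set i v = l.set i v := by
  apply List.ext_getElem? ; intro j
  by_cases hj : j = i
  · subst hj; simp [List.getElem?_set]
  · simp [Ne.symm hj]

theorem incPalin_key (i : Nat) (palin : List Int) (mid : Bool) (h : i < palin.length) :
    incPalinLoopA mid (palin.modify i (· + 1)) i =
      (match incPalinTrail palin (i+1) with
       | (p, some j) => (mid, p.modify j (· + 1))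
       | (p, none) => if mid then (false, 1 :: p) else (true, p.set 0 1)) := by
  induction i generalizing palin with
  | zero =>
      rw [incPalinLoopA, incPalinTrail]
      simp only [List.getD_eq_getElem?_getD, incPalin_getD_modify_self _ _ _ h]
      by_cases h9 : palin[0]?.getD 0 = 9
      · have h10 : palin[0]?.getD 0 + 1 = 10 := by omega
        rw [h9]
        norm_num [incPalin_set_modify_self, incPalinTrail, List.set_set]
      · have h10 : ¬ (palin[0]?.getD 0 + 1 = 10) := by omega
        simp [h9, h10]
  | succ m ih =>
      rw [incPalinLoopA, incPalinTrail]
      simp only [List.getD_eq_getElem?_getD, incPalin_getD_modify_self _ _ _ h]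
      by_cases h9 : palin[m+1]?.getD 0 = 9
      · have h10 : palin[m+1]?.getD 0 + 1 = 10 := by omega
        simp only [h9, beq_self_eq_true, Nat.succ_sub_one,
          incPalin_set_modify_self, Nat.succ_pos, if_pos]
        have hlen : m < (palin.set (m+1) 0).length := by simp; omega
        exact ih (palin.set (m+1) 0) hlen
      · have h10 : ¬ (palin[m+1]?.getD 0 + 1 = 10) := by omega
        simp [h9, h10]

theorem incPalin_trail_append (k : Nat) (l zs : List Int) (hk : k ≤ l.length) :
    incPalinTrail (l ++ zs) k = ((incPalinTrail l k).1 ++ zs, (incPalinTrail l k).2) := by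
  induction k generalizing l with
  | zero => simp [incPalinTrail]
  | succ m ih =>
      have hm : m < l.length := by omega
      rw [incPalinTrail, incPalinTrail]
      have hget : (l ++ zs).getD m 0 = l.getD m 0 := by
        simp [List.getD_eq_getElem?_getD, List.getElem?_append_left hm]
      rw [hget]
      have hset : (l ++ zs).set m 0 = l.set m 0 ++ zs := List.set_append_left m 0 hm
      by_cases h9 : l.getD m 0 = 9
      · simp only [List.getD_eq_getElem?_getD] at h9
        simp only [List.getD_eq_getElem?_getD, h9, beq_self_eq_true, if_true, hset]
        exact ih (l.set m 0) (by simpa using hm.le)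
      · simp only [List.getD_eq_getElem?_getD] at h9
        simp [List.getD_eq_getElem?_getD, h9]

theorem incPalin_lastNon9_concat (l : List Int) (d : Int) :
    incPalinLastNon9 (l ++ [d]) =
      if d ≠ 9 then (l.length : Int) else incPalinLastNon9 l := by
  unfold incPalinLastNon9
  rw [PySem.List.enumerate_append]
  rw [List.foldl_append]
  simp [PySem.List.enumerate]

theorem incPalin_trail_char (palin : List Int) :
    incPalinTrail palin palin.length =
      (if incPalinLastNon9 palin ≥ 0 then
        (palin.take ((incPalinLastNon9 palin).toNat + 1) ++
          List.replicate (palin.length - (incPalinLastNon9 palin).toNat - 1) 0,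
         some (incPalinLastNon9 palin).toNat)
       else (List.replicate palin.length 0, none))
    ∧ incPalinLastNon9 palin < (palin.length : Int) ∧ -1 ≤ incPalinLastNon9 palin := by
  induction palin using List.reverseRecOn with
  | nil => decide
  | append_singleton l d ih =>
      obtain ⟨ih1, ih2, ih3⟩ := ih
      have hlen : (l ++ [d]).length = l.length + 1 := by simp
      have hget : (l ++ [d]).getD l.length 0 = d := by
        simp [List.getD_eq_getElem?_getD]
      rw [incPalin_lastNon9_concat, hlen, incPalinTrail, hget]
      by_cases h9 : d = 9
      · subst h9
        have hset : (l ++ [(9:Int)]).set l.length 0 = l ++ [0] := by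
          rw [List.set_append_right _ _ (le_refl _)]
          simp
        rw [if_pos (by decide), hset,
          incPalin_trail_append l.length l [0] (le_refl _), ih1]
        simp only [ne_eq, not_true_eq_false, if_false]
        by_cases hp : incPalinLastNon9 l ≥ 0
        · have hq : (incPalinLastNon9 l).toNat < l.length := by omega
          simp only [hp, if_true]
          refine ⟨?_, by omega, by omega⟩
          have ht : (l ++ [(9:Int)]).take ((incPalinLastNon9 l).toNat + 1) =
              l.take ((incPalinLastNon9 l).toNat + 1) := List.take_append_of_le_length (by omega)
          have hr : List.replicate (l.length - (incPalinLastNon9 l).toNat - 1) (0:Int) ++ [0] =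
              List.replicate (l.length + 1 - (incPalinLastNon9 l).toNat - 1) 0 := by
            rw [← List.replicate_succ']
            congr 1
            omega
          simp [ht, ← hr, List.append_assoc]
        · simp only [hp, if_false]
          refine ⟨?_, by omega, by omega⟩
          simp [← List.replicate_succ']
      · have hnn : (0:Int) ≤ (l.length : Int) := by positivity
        rw [if_neg (by simpa using h9), if_pos h9, if_pos hnn]
        refine ⟨?_, by omega, by omega⟩
        have htn : ((l.length : Int)).toNat = l.length := by omega
        have ht : (l ++ [d]).take (l.length + 1) = l ++ [d] := by
          apply List.take_of_length_le
          simp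
        simp [htn, ht]

theorem incPalin_modify_take_append (palin : List Int) (j m : Nat) (hj : j < palin.length) :
    (palin.take (j+1) ++ List.replicate m (0:Int)).modify j (· + 1) =
      (palin.modify j (· + 1)).take (j+1) ++ List.replicate m 0 := by
  apply List.ext_getElem? ; intro k
  rw [List.getElem?_modify]
  by_cases hk : k < j + 1
  · have h2 : k < (palin.take (j+1)).length := by simp; omega
    rw [List.getElem?_append_left h2,
      List.getElem?_append_left (by simpa using h2)]
    rw [List.getElem?_take, if_pos hk, List.getElem?_take, if_pos hk,
      List.getElem?_modify]
  · have h2 : (palin.take (j+1)).length ≤ k := by simp; omega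
    rw [List.getElem?_append_right h2,
      List.getElem?_append_right (by simpa using h2)]
    have hjk : j ≠ k := by omega
    simp [hjk]

-- ===== VERDICT (by name: the statement is the Claim_ definition above) =====
theorem incPalin_spec : Claim_equal_incPalin := by
  intro ⟨mid, palin⟩ _ hpre
  unfold Spec_incPalin incPalin incPalin_alt
  simp only
  obtain ⟨n, hn⟩ : ∃ n, palin.length = n + 1 := by
    cases palin with
    | nil => exact absurd rfl hpre
    | cons a l => exact ⟨l.length, rfl⟩
  have h : n < palin.length := by omega
  rw [hn]
  simp only [Nat.add_sub_cancel]
  rw [incPalin_key n palin mid h]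
  obtain ⟨hc, hlt, hge⟩ := incPalin_trail_char palin
  rw [hn] at hc
  rw [hc]
  by_cases hp : incPalinLastNon9 palin ≥ 0
  · have hq : (incPalinLastNon9 palin).toNat < palin.length := by omega
    simp only [hp, if_pos]
    rw [incPalin_modify_take_append palin _ _ hq]
  · simp only [hp, if_false]
    by_cases hm : mid
    · simp [hm]
    · simp only [hm, Bool.false_eq_true, if_false]
      simp [List.replicate_succ]
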